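-- pv_equiv track=rewrite | github.com/YadaYuki/AtCoder | 0621/c.py | get_digit_num
-- ===== SOURCE A (Python) =====
-- def get_digit_num(num):
--     num -= 1
--     if num < 26:
--         return 1,num
--     prev_last,digit_num = 25,2
--     while True:
--         if (prev_last < num < prev_last + (26 ** digit_num) + 1):
--             num -= prev_last + 1
--             break
--         prev_last = prev_last + (26 ** digit_num)
--         digit_num += 1
--     return digit_num,num
-- ===== SOURCE B (Python) =====
-- def get_digit_num(num):
--     if num <= 26:
--         return 1, num - 1
--     q, r = divmod(num - 1, 26)
--     d, off = get_digit_num(q)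
--     return d + 1, off * 26 + r
-- ===== Notes on version B (the rewrite author's own statement) =====
-- stated objective: alternative
-- what changed: Replaces A's upward iteration over digit-length blocks (cumulative boundary prev_last plus recomputed 26**digit_num) by a recursive bijective base-26 divmod decomposition that divides num down and reassembles the offset positionally (off*26+r) on the way back up.
import Mathlib
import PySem

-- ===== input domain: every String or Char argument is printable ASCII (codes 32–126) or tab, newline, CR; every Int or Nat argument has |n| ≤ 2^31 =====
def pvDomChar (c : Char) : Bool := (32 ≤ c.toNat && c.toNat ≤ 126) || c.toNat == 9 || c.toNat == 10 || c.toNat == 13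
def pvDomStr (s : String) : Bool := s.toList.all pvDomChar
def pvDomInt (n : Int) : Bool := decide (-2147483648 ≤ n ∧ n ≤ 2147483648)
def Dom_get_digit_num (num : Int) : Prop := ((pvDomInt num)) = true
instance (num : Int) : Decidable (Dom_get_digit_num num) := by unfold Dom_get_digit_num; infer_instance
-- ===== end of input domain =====

-- B replaces A's upward scan over digit-length blocks by a recursive bijective base-26
-- divmod decomposition; objective: alternative. Equivalence proved for all Int.

-- ===== PORT A =====
-- A's 'while True' loop. Python's loop runs forever if num ≤ prev_last (unreachable from
-- get_digit_num, where prev_last < num is invariant); the outer 'else' branch is a totality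
-- guard only for that unreachable state.
def pvALoop (num prev_last digit_num : Int) : Int × Int :=
  if h : prev_last < num then
    if num < prev_last + 26 ^ digit_num.toNat + 1 then
      (digit_num, num - (prev_last + 1))
    else
      pvALoop num (prev_last + 26 ^ digit_num.toNat) (digit_num + 1)
  else (digit_num, num)
termination_by (num - prev_last).toNat
decreasing_by
  have h1 : (1 : Int) ≤ 26 ^ digit_num.toNat := one_le_pow₀ (by norm_num)
  omega

def get_digit_num (num : Int) : Int × Int :=
  let num := num - 1
  if num < 26 then (1, num)
  else pvALoop num 25 2

-- ===== PORT B =====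
-- Source B: base case num ≤ 26 → (1, num-1); otherwise q, r = divmod(num-1, 26), recurse on q,
-- return (d+1, off*26+r). PySem.Int.floordiv/mod are exactly Python's divmod.
def get_digit_num_alt (num : Int) : Int × Int :=
  if num ≤ 26 then (1, num - 1)
  else
    let q := PySem.Int.floordiv (num - 1) 26
    let r := PySem.Int.mod (num - 1) 26
    let p := get_digit_num_alt q
    (p.1 + 1, p.2 * 26 + r)
termination_by num.toNat
decreasing_by
  have hq : PySem.Int.floordiv (num - 1) 26 = (num - 1) / 26 :=
    PySem.Int.floordiv_eq_ediv_of_pos (by norm_num)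
  have h1 : (num - 1) / 26 < num - 1 := by
    apply Int.ediv_lt_of_lt_mul (by norm_num); omega
  have h2 : 1 ≤ (num - 1) / 26 := by
    rw [Int.le_ediv_iff_mul_le (by norm_num)]; omega
  simp only [hq]; omega

-- ===== PRECONDITION & SPEC =====
def Spec_get_digit_num (num : Int) (out : Int × Int) : Prop := out = get_digit_num_alt num
instance (num : Int) (out : Int × Int) : Decidable (Spec_get_digit_num num out) := by unfold Spec_get_digit_num; infer_instance

-- ===== CLAIM (what is proved, stated in full; the proofs are below) =====
def Claim_equal_get_digit_num : Prop := ∀ (num : Int), Dom_get_digit_num num → Spec_get_digit_num num (get_digit_num num)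

-- ===== LEMMAS AND PROOFS =====

-- T k = 26 + 26^2 + ... + 26^k, the count of bijective base-26 strings of length ≤ k.
def pvT : Nat → Int
  | 0 => 0
  | k + 1 => 26 * (pvT k + 1)

theorem pvT_nonneg (k : Nat) : 0 ≤ pvT k := by
  induction k with
  | zero => simp [pvT]
  | succ k ih => simp only [pvT]; omega

theorem pvT_succ (k : Nat) : pvT (k + 1) = pvT k + 26 ^ (k + 1) := by
  induction k with
  | zero => simp [pvT]
  | succ k ih => simp only [pvT] at ih ⊢; rw [pow_succ]; omega

theorem pvT_mono {j k : Nat} (h : j ≤ k) : pvT j ≤ pvT k := by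
  induction k with
  | zero =>
    have : j = 0 := by omega
    subst this; omega
  | succ k ih =>
    rcases Nat.lt_or_ge j (k + 1) with hlt | hge
    · have := ih (by omega)
      have hp : (0 : Int) < 26 ^ (k + 1) := by positivity
      rw [pvT_succ]; omega
    · have : j = k + 1 := by omega
      subst this; omega

-- A's loop, started at state (prev = pvT k - 1, digit = k+1), returns (D+1, off) for the
-- unique D with n = pvT D + off, 0 ≤ off < 26^(D+1), provided k ≤ D and pvT k ≤ n.
theorem pvALoop_char (D k : Nat) (n off : Int) (hkD : k ≤ D) (hlo : pvT k ≤ n)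
    (hsum : n = pvT D + off) (h0 : 0 ≤ off) (hlt : off < 26 ^ (D + 1)) :
    pvALoop n (pvT k - 1) ((k : Int) + 1) = (((D : Int) + 1), off) := by
  have hT : 0 ≤ pvT k := pvT_nonneg k
  have htn : ((k : Int) + 1).toNat = k + 1 := by omega
  rcases Nat.lt_or_ge k D with hkD' | hge
  · -- not yet at the right block: step
    rw [pvALoop]
    have hTk1 : pvT (k + 1) ≤ n := by
      have h1 := pvT_mono (show k + 1 ≤ D by omega)
      omega
    have hs : pvT (k + 1) = pvT k + 26 ^ (k + 1) := pvT_succ k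
    rw [dif_pos (by omega), if_neg (by rw [htn]; omega)]
    have heq1 : pvT k - 1 + 26 ^ ((k : Int) + 1).toNat = pvT (k + 1) - 1 := by
      rw [htn]; omega
    have heq2 : ((k : Int) + 1) + 1 = ((k + 1 : Nat) : Int) + 1 := by push_cast; ring
    rw [heq1, heq2]
    exact pvALoop_char D (k + 1) n off (by omega) (by omega) hsum h0 hlt
  · -- k = D: exit
    have hk : k = D := by omega
    subst hk
    rw [pvALoop]
    rw [dif_pos (by omega), if_pos (by rw [htn]; omega)]
    simp only [Prod.mk.injEq]
    exact ⟨trivial, by omega⟩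
termination_by D - k

-- B's recursion computes exactly that characterization.
theorem pvB_char : ∀ (num : Int), 1 ≤ num → ∃ (D : Nat) (off : Int),
    get_digit_num_alt num = (((D : Int) + 1), off) ∧ num - 1 = pvT D + off ∧
    0 ≤ off ∧ off < 26 ^ (D + 1) := by
  intro num h1
  by_cases h : num ≤ 26
  · refine ⟨0, num - 1, ?_, by simp [pvT], by omega, by norm_num; omega⟩
    rw [get_digit_num_alt, if_pos h]; norm_num
  · have hq : PySem.Int.floordiv (num - 1) 26 = (num - 1) / 26 :=
      PySem.Int.floordiv_eq_ediv_of_pos (by norm_num)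
    have hr : PySem.Int.mod (num - 1) 26 = (num - 1) % 26 :=
      PySem.Int.mod_eq_emod_of_pos (by norm_num)
    have hq1 : 1 ≤ (num - 1) / 26 := by
      rw [Int.le_ediv_iff_mul_le (by norm_num)]; omega
    have hqlt : (num - 1) / 26 < num - 1 := by
      apply Int.ediv_lt_of_lt_mul (by norm_num); omega
    have hrb : 0 ≤ (num - 1) % 26 ∧ (num - 1) % 26 < 26 :=
      ⟨Int.emod_nonneg _ (by norm_num), Int.emod_lt_of_pos _ (by norm_num)⟩
    have hdm : 26 * ((num - 1) / 26) + (num - 1) % 26 = num - 1 := by omega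
    obtain ⟨D, off, hB, hsum, h0, hlt⟩ := pvB_char ((num - 1) / 26) hq1
    refine ⟨D + 1, off * 26 + (num - 1) % 26, ?_, ?_, by omega, ?_⟩
    · rw [get_digit_num_alt, if_neg h]
      simp only [hq, hr, hB, Prod.mk.injEq]
      exact ⟨by push_cast; ring, trivial⟩
    · simp only [pvT]; omega
    · have : 26 ^ (D + 1 + 1) = 26 ^ (D + 1) * 26 := by rw [pow_succ]
      omega
termination_by num => num.toNat
decreasing_by omega

-- ===== VERDICT (by name: the statement is the Claim_ definition above) =====
theorem get_digit_num_spec : Claim_equal_get_digit_num := by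
  intro num _
  unfold Spec_get_digit_num get_digit_num
  simp only
  by_cases h : num - 1 < 26
  · rw [if_pos h, get_digit_num_alt, if_pos (by omega)]
  · rw [if_neg h]
    obtain ⟨D, off, hB, hsum, h0, hlt⟩ := pvB_char num (by omega)
    have hD1 : 1 ≤ D := by
      by_contra hc
      have : D = 0 := by omega
      subst this
      simp [pvT] at hsum
      norm_num at hlt
      omega
    have h25 : (25 : Int) = pvT 1 - 1 := by simp [pvT]
    have h2 : (2 : Int) = ((1 : Nat) : Int) + 1 := by norm_num
    rw [hB, h25, h2]
    exact pvALoop_char D 1 (num - 1) off hD1 (by simp [pvT]; omega) (by omega) h0 hlt
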